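-- pv_equiv track=rewrite | github.com/algocean1204/Mac_OCR_APP | backend/pdf/splitter.py | _calculate_simple_ranges
-- ===== SOURCE A (Python) =====
-- def _calculate_simple_ranges(
--     total_pages: int,
--     num_parts: int,
-- ) -> list[tuple[int, int]]:
--     """chunk_size 정렬 불가 시 균등 분배로 폴백한다."""
--     base = total_pages // num_parts
--     remainder = total_pages % num_parts
--
--     ranges: list[tuple[int, int]] = []
--     current = 0
--
--     for i in range(num_parts):
--         # 나머지 페이지는 앞쪽 권에 1페이지씩 추가한다
--         extra = 1 if i < remainder else 0
--         size = base + extra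
--         if size == 0:
--             continue
--         ranges.append((current, current + size - 1))
--         current += size
--
--     return ranges
-- ===== SOURCE B (Python) =====
-- def _calculate_simple_ranges(
--     total_pages: int,
--     num_parts: int,
-- ) -> list[tuple[int, int]]:
--     """Greedy peeling: repeatedly cut off the ceiling share of what is left."""
--     ranges: list[tuple[int, int]] = []
--     start = 0
--     remaining = total_pages
--     parts_left = num_parts
--     while parts_left > 0:
--         first = -(-remaining // parts_left)  # ceil division of the pages left
--         if first != 0:
--             ranges.append((start, start + first - 1))
--         start += first
--         remaining -= first
--         parts_left -= 1
--     return ranges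
-- ===== Notes on version B (the rewrite author's own statement) =====
-- stated objective: alternative
-- what changed: B replaces A's precomputed base/remainder and index loop by greedy peeling: each iteration cuts off the ceiling share ceil(remaining/parts_left) of the pages still left, redoing the division every step instead of distributing a precomputed remainder by index comparison.
import Mathlib
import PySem

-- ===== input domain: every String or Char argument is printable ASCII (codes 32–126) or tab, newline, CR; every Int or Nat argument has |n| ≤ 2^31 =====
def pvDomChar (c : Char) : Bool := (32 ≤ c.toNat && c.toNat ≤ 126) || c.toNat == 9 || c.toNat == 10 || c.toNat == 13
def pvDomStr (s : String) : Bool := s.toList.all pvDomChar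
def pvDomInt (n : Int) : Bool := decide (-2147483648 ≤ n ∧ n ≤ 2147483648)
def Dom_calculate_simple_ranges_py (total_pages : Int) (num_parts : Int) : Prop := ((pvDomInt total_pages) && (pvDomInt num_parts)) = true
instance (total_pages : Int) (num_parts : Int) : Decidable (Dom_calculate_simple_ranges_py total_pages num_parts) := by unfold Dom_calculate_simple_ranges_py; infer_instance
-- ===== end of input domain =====

-- B replaces A's precomputed base/remainder index loop by greedy peeling of ceil(remaining/parts_left) each step (alternative algorithm, same cost).

-- ===== PORT A =====
def calculate_simple_ranges_py (total_pages : Int) (num_parts : Int) : List (Int × Int) :=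
  let base := PySem.Int.floordiv total_pages num_parts
  let remainder := PySem.Int.mod total_pages num_parts
  ((PySem.List.pyRange 0 num_parts 1).foldl
    (fun (st : List (Int × Int) × Int) i =>
      let extra : Int := if i < remainder then 1 else 0
      let size := base + extra
      if size = 0 then st
      else (st.1 ++ [(st.2, st.2 + size - 1)], st.2 + size))
    ([], 0)).1

-- ===== PORT B =====
-- B's while-loop: state (ranges, start, remaining, parts_left), peeling ceil(remaining/parts_left).
def pvAltLoop (ranges : List (Int × Int)) (start remaining parts_left : Int) : List (Int × Int) :=
  if h : 0 < parts_left then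
    let first := -(PySem.Int.floordiv (-remaining) parts_left)
    let ranges' := if first ≠ 0 then ranges ++ [(start, start + first - 1)] else ranges
    pvAltLoop ranges' (start + first) (remaining - first) (parts_left - 1)
  else ranges
termination_by parts_left.toNat
decreasing_by omega

def calculate_simple_ranges_py_alt (total_pages : Int) (num_parts : Int) : List (Int × Int) :=
  pvAltLoop [] 0 total_pages num_parts

-- ===== PRECONDITION & SPEC =====
-- Pre_ excludes exactly num_parts = 0, where Python A raises ZeroDivisionError.
def Pre_calculate_simple_ranges_py (total_pages : Int) (num_parts : Int) : Prop := num_parts ≠ 0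
instance (total_pages : Int) (num_parts : Int) : Decidable (Pre_calculate_simple_ranges_py total_pages num_parts) := by unfold Pre_calculate_simple_ranges_py; infer_instance
def pvWitness_calculate_simple_ranges_py : Int × Int := (10, 3)

def Spec_calculate_simple_ranges_py (total_pages : Int) (num_parts : Int) (out : List (Int × Int)) : Prop := out = calculate_simple_ranges_py_alt total_pages num_parts
instance (total_pages : Int) (num_parts : Int) (out : List (Int × Int)) : Decidable (Spec_calculate_simple_ranges_py total_pages num_parts out) := by unfold Spec_calculate_simple_ranges_py; infer_instance

-- ===== CLAIM (what is proved, stated in full; the proofs are below) =====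
def Claim_equal_calculate_simple_ranges_py : Prop := ∀ (total_pages : Int) (num_parts : Int), Dom_calculate_simple_ranges_py total_pages num_parts → Pre_calculate_simple_ranges_py total_pages num_parts → Spec_calculate_simple_ranges_py total_pages num_parts (calculate_simple_ranges_py total_pages num_parts)

-- ===== LEMMAS AND PROOFS =====

/-- A's loop body, named for the proofs. -/
def pvStepA (base rem : Int) (st : List (Int × Int) × Int) (i : Int) : List (Int × Int) × Int :=
  let extra : Int := if i < rem then 1 else 0
  let size := base + extra
  if size = 0 then st
  else (st.1 ++ [(st.2, st.2 + size - 1)], st.2 + size)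

/-- A's loop in counted recursive form, index running a, a+1, … -/
def pvLoopA (base rem : Int) (a : Int) (n : Nat) (st : List (Int × Int) × Int) : List (Int × Int) × Int :=
  match n with
  | 0 => st
  | n + 1 => pvLoopA base rem (a + 1) n (pvStepA base rem st a)

theorem pvLoopA_eq_foldl (base rem : Int) (n : Nat) :
    ∀ (a : Int) (st : List (Int × Int) × Int),
      (PySem.List.pyRange a (a + n) 1).foldl (pvStepA base rem) st = pvLoopA base rem a n st := by
  induction n with
  | zero => intro a st; rw [PySem.List.pyRange_one_eq_nil (by omega)]; rfl
  | succ k ih =>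
    intro a st
    rw [PySem.List.pyRange_one_cons (by push_cast; omega)]
    rw [List.foldl_cons, show a + ((k + 1 : Nat) : Int) = (a + 1) + (k : Int) by push_cast; ring, ih]
    rfl

theorem pvLoopA_eq_foldl_zero (base rem : Int) (n : Nat) (st : List (Int × Int) × Int) :
    (PySem.List.pyRange 0 (n : Int) 1).foldl (pvStepA base rem) st = pvLoopA base rem 0 n st := by
  have h := pvLoopA_eq_foldl base rem n 0 st
  rwa [zero_add] at h

/-- Shifting the start index down by one is the same as shifting rem down by one. -/
theorem pvLoopA_shift (base rem : Int) (n : Nat) :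
    ∀ (a : Int) (st : List (Int × Int) × Int),
      pvLoopA base rem (a + 1) n st = pvLoopA base (rem - 1) a n st := by
  induction n with
  | zero => intro a st; rfl
  | succ k ih =>
    intro a st
    show pvLoopA base rem (a + 1 + 1) k (pvStepA base rem st (a + 1))
       = pvLoopA base (rem - 1) (a + 1) k (pvStepA base (rem - 1) st a)
    rw [ih]
    have h : pvStepA base rem st (a + 1) = pvStepA base (rem - 1) st a := by
      unfold pvStepA
      have hc : ((a + 1 < rem) ↔ (a < rem - 1)) := by omega
      simp only [hc]
    rw [h]

/-- The comparison with rem only matters through its truth value on the visited indices. -/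
theorem pvLoopA_congr (base rem rem' : Int) (n : Nat) :
    ∀ (a : Int) (st : List (Int × Int) × Int),
      (∀ i : Int, a ≤ i → i < a + n → ((i < rem) ↔ (i < rem'))) →
      pvLoopA base rem a n st = pvLoopA base rem' a n st := by
  induction n with
  | zero => intro a st _; rfl
  | succ k ih =>
    intro a st h
    show pvLoopA base rem (a + 1) k (pvStepA base rem st a)
       = pvLoopA base rem' (a + 1) k (pvStepA base rem' st a)
    have hstep : pvStepA base rem st a = pvStepA base rem' st a := by
      unfold pvStepA
      simp only [h a le_rfl (by push_cast; omega)]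
    rw [hstep, ih (a + 1) _ (fun i h1 h2 => h i (by omega) (by push_cast at h2 ⊢; omega))]

/-- Main invariant: B's peeling loop computes A's loop on the division data of the current state. -/
theorem pvPeel_eq_loopA (k : Nat) :
    ∀ (remaining cur : Int) (ranges : List (Int × Int)),
      pvAltLoop ranges cur remaining (k : Int)
        = (pvLoopA (PySem.Int.floordiv remaining (k : Int)) (PySem.Int.mod remaining (k : Int))
            0 k (ranges, cur)).1 := by
  induction k with
  | zero => intro remaining cur ranges; rw [pvAltLoop]; simp [pvLoopA]
  | succ k ih =>
    intro x cur ranges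
    rw [show (((k + 1 : Nat)) : Int) = (k : Int) + 1 by push_cast; ring]
    have hm : (0 : Int) < (k : Int) + 1 := by positivity
    set m : Int := (k : Int) + 1 with hmdef
    set base := PySem.Int.floordiv x m with hbase
    set rem := PySem.Int.mod x m with hrem
    have hx : base * m + rem = x := PySem.Int.floordiv_mul_add_mod x m
    have hrem0 : 0 ≤ rem := PySem.Int.mod_nonneg x hm
    have hremlt : rem < m := PySem.Int.mod_lt x hm
    -- the peeled first chunk is the ceiling share
    have hfirst : -(PySem.Int.floordiv (-x) m) = base + (if rem = 0 then 0 else 1) := by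
      by_cases h0 : rem = 0
      · rw [if_pos h0, PySem.Int.neg_floordiv_neg_eq_iff_of_pos hm]
        constructor <;> nlinarith
      · have h0' : 0 < rem := by omega
        rw [if_neg h0, PySem.Int.neg_floordiv_neg_eq_iff_of_pos hm]
        constructor <;> nlinarith
    rw [pvAltLoop]
    simp only [dif_pos hm, hfirst]
    set first := base + (if rem = 0 then 0 else 1) with hfdef
    -- one step of A's loop from index 0
    have hstep : pvStepA base rem (ranges, cur) 0
        = ((if first ≠ 0 then ranges ++ [(cur, cur + first - 1)] else ranges), cur + first) := by
      unfold pvStepA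
      have hextra : (if (0 : Int) < rem then (1 : Int) else 0) = (if rem = 0 then 0 else 1) := by
        split_ifs <;> omega
      simp only [hextra, ← hfdef]
      by_cases hf : first = 0
      · simp [hf]
      · simp [hf]
    rw [show m - 1 = (k : Int) by rw [hmdef]; ring, ih]
    show _ = (pvLoopA base rem 0 (k + 1) (ranges, cur)).1
    have hrhs : pvLoopA base rem 0 (k + 1) (ranges, cur)
        = pvLoopA base (rem - 1) 0 k (pvStepA base rem (ranges, cur) 0) := by
      show pvLoopA base rem (0 + 1) k (pvStepA base rem (ranges, cur) 0) = _
      rw [pvLoopA_shift]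
    rw [hrhs, hstep]
    rcases Nat.eq_zero_or_pos k with hk0 | hkpos
    · subst hk0; rfl
    · have hkpos' : (0 : Int) < (k : Int) := by exact_mod_cast hkpos
      by_cases h0 : rem = 0
      · -- exact division: next base' = base, rem' = 0; comparing with rem-1 = -1 agrees with 0 on i ≥ 0
        have hf : first = base := by rw [hfdef, if_pos h0]; ring
        have hfd : PySem.Int.floordiv (x - first) (k : Int) = base := by
          rw [PySem.Int.floordiv_eq_iff_of_pos hkpos']
          constructor <;> nlinarith
        have hmd : PySem.Int.mod (x - first) (k : Int) = 0 := by
          have h2 := PySem.Int.floordiv_mul_add_mod (x - first) (k : Int)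
          rw [hfd] at h2; nlinarith
        rw [hfd, hmd, pvLoopA_congr base 0 (rem - 1) k 0 _ (by intro i h1 h2; omega)]
      · -- remainder case: next base' = base, rem' = rem - 1
        have hf : first = base + 1 := by rw [hfdef, if_neg h0]
        have h0' : 0 < rem := by omega
        have hfd : PySem.Int.floordiv (x - first) (k : Int) = base := by
          rw [PySem.Int.floordiv_eq_iff_of_pos hkpos']
          constructor <;> nlinarith
        have hmd : PySem.Int.mod (x - first) (k : Int) = rem - 1 := by
          have h2 := PySem.Int.floordiv_mul_add_mod (x - first) (k : Int)
          rw [hfd] at h2; nlinarith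
        rw [hfd, hmd]

-- ===== VERDICT (by name: the statement is the Claim_ definition above) =====
theorem calculate_simple_ranges_py_spec : Claim_equal_calculate_simple_ranges_py := by
  intro tp np _ hnp
  unfold Spec_calculate_simple_ranges_py calculate_simple_ranges_py calculate_simple_ranges_py_alt
  rcases lt_or_gt_of_ne hnp with hneg | hpos
  · rw [PySem.List.pyRange_one_eq_nil (by omega), pvAltLoop]
    simp [not_lt.mpr hneg.le]
  · show ((PySem.List.pyRange 0 np 1).foldl
        (pvStepA (PySem.Int.floordiv tp np) (PySem.Int.mod tp np)) ([], 0)).1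
      = pvAltLoop [] 0 tp np
    rw [show np = ((np.toNat : Nat) : Int) by omega, pvLoopA_eq_foldl_zero, pvPeel_eq_loopA]
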